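-- pv_equiv track=rewrite | github.com/RSenApps/bril | examples/ourlvn.py | find_overwritten_instr_idxs
-- ===== SOURCE A (Python) =====
-- def find_overwritten_instr_idxs(block_instrs):
--     overwritten_idxs = set()
--     seen = set()
--     for idx, instr in reversed(list(enumerate(block_instrs))):
--         if 'dest' in instr:
--             if instr['dest'] in seen:
--                 overwritten_idxs.add(idx)
--             seen.add(instr['dest'])
--     return overwritten_idxs
-- ===== SOURCE B (Python) =====
-- def find_overwritten_instr_idxs(block_instrs):
--     # Pass 1: table mapping each dest to the LAST index at which it is defined.
--     last_def = {}
--     for idx, instr in enumerate(block_instrs):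
--         if 'dest' in instr:
--             last_def[instr['dest']] = idx
--     # Pass 2: an index is overwritten iff it is not the final definition of its
--     # dest.  (The scan direction is irrelevant for the resulting set.)
--     overwritten_idxs = set()
--     for idx, instr in reversed(list(enumerate(block_instrs))):
--         if 'dest' in instr and idx != last_def[instr['dest']]:
--             overwritten_idxs.add(idx)
--     return overwritten_idxs
-- ===== Notes on version B (the rewrite author's own statement) =====
-- stated objective: alternative
-- what changed: Replaces the reverse scan with a stateful seen-set by a two-pass table-then-filter scheme: a forward pass builds a last-definition index table, then a filter pass marks every definition whose index is not the last one for its dest.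
import Mathlib
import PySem

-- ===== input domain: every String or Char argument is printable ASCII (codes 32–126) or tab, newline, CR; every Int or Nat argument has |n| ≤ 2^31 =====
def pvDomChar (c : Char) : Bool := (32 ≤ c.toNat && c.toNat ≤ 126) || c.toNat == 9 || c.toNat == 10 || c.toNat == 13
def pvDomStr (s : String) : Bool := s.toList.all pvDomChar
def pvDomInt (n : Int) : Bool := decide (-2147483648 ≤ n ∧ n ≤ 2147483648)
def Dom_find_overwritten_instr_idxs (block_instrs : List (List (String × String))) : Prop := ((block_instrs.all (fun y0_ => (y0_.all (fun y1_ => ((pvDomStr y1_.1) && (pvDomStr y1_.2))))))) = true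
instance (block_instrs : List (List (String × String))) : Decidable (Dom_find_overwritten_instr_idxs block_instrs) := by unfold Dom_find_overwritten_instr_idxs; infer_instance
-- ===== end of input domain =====

-- B replaces A's reverse scan with a seen-set by a two-pass scheme (forward pass building a
-- last-definition table, then a filter pass keeping non-final definitions): an alternative
-- decomposition of the same O(n) task.


-- ===== PORT A =====
-- `'dest' in instr` / `instr['dest']` on the instruction dict (assoc list, first match)
def pvDest (instr : List (String × String)) : Option String :=
  (PySem.Dict.mk instr).get? "dest"

-- loop body of A: state = (overwritten_idxs, seen)
def pvStepA (st : PySem.Set Int × PySem.Set String) (p : Int × List (String × String)) :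
    PySem.Set Int × PySem.Set String :=
  match pvDest p.2 with
  | some d =>
      (if d ∈ st.2 then PySem.Set.add st.1 p.1 else st.1,
       PySem.Set.add st.2 d)
  | none => st

def find_overwritten_instr_idxs (block_instrs : List (List (String × String))) : List Int :=
  ((PySem.List.enumerate block_instrs 0).reverse.foldl pvStepA
    (PySem.Set.empty, PySem.Set.empty)).1

-- ===== PORT B =====
-- pass 1 of B: last_def[dest] = highest index defining dest
def pvLastDef (block_instrs : List (List (String × String))) : PySem.Dict String Int :=
  (PySem.List.enumerate block_instrs 0).foldl
    (fun d p =>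
      match pvDest p.2 with
      | some dst => d.insert dst p.1
      | none => d)
    PySem.Dict.empty

-- loop body of B's filter pass; the inner `none` branch is unreachable (a dest occurring at
-- p.1 was recorded in pass 1), so Python's last_def[instr['dest']] never raises
def pvStepB (last_def : PySem.Dict String Int) (s : PySem.Set Int)
    (p : Int × List (String × String)) : PySem.Set Int :=
  match pvDest p.2 with
  | some dst =>
      match last_def.get? dst with
      | some j => if p.1 ≠ j then PySem.Set.add s p.1 else s
      | none => s
  | none => s

def find_overwritten_instr_idxs_alt (block_instrs : List (List (String × String))) : List Int :=
  let last_def := pvLastDef block_instrs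
  (PySem.List.enumerate block_instrs 0).reverse.foldl (pvStepB last_def) PySem.Set.empty

-- ===== PRECONDITION & SPEC =====
def Spec_find_overwritten_instr_idxs (block_instrs : List (List (String × String))) (out : List Int) : Prop := out = find_overwritten_instr_idxs_alt block_instrs
instance (block_instrs : List (List (String × String))) (out : List Int) : Decidable (Spec_find_overwritten_instr_idxs block_instrs out) := by unfold Spec_find_overwritten_instr_idxs; infer_instance

-- ===== CLAIM (what is proved, stated in full; the proofs are below) =====
def Claim_equal_find_overwritten_instr_idxs : Prop := ∀ (block_instrs : List (List (String × String))), Dom_find_overwritten_instr_idxs block_instrs → Spec_find_overwritten_instr_idxs block_instrs (find_overwritten_instr_idxs block_instrs)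

-- ===== LEMMAS AND PROOFS =====

theorem pvStepA_none (st : PySem.Set Int × PySem.Set String) (p : Int × List (String × String))
    (h : pvDest p.2 = none) : pvStepA st p = st := by simp [pvStepA, h]

theorem pvStepA_some_fst (st : PySem.Set Int × PySem.Set String)
    (p : Int × List (String × String)) (d : String) (h : pvDest p.2 = some d) :
    (pvStepA st p).1 = if d ∈ st.2 then PySem.Set.add st.1 p.1 else st.1 := by
  simp [pvStepA, h]

theorem pvStepA_some_snd (st : PySem.Set Int × PySem.Set String)
    (p : Int × List (String × String)) (d : String) (h : pvDest p.2 = some d) :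
    (pvStepA st p).2 = PySem.Set.add st.2 d := by simp [pvStepA, h]

theorem pvStepB_none (LD : PySem.Dict String Int) (s : PySem.Set Int)
    (p : Int × List (String × String)) (h : pvDest p.2 = none) : pvStepB LD s p = s := by
  simp [pvStepB, h]

theorem pvStepB_some_some (LD : PySem.Dict String Int) (s : PySem.Set Int)
    (p : Int × List (String × String)) (dst : String) (j : Int) (h : pvDest p.2 = some dst)
    (hj : LD.get? dst = some j) :
    pvStepB LD s p = if p.1 ≠ j then PySem.Set.add s p.1 else s := by simp [pvStepB, h, hj]

theorem pvStepB_some_none (LD : PySem.Dict String Int) (s : PySem.Set Int)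
    (p : Int × List (String × String)) (dst : String) (h : pvDest p.2 = some dst)
    (hj : LD.get? dst = none) : pvStepB LD s p = s := by simp [pvStepB, h, hj]

-- the `seen` component of A's fold collects exactly the dests occurring in the processed part
theorem pvSeenA_mem (l : List (Int × List (String × String))) (d : String) :
    d ∈ (l.foldr (fun x y => pvStepA y x) (PySem.Set.empty, PySem.Set.empty)).2 ↔
      ∃ q ∈ l, pvDest q.2 = some d := by
  induction l with
  | nil => simp [PySem.Set.empty]
  | cons x t ih =>
    simp only [List.foldr_cons]
    cases hx : pvDest x.2 with
    | none =>
      rw [pvStepA_none _ x hx, ih]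
      constructor
      · rintro ⟨q, hq, hqd⟩; exact ⟨q, List.mem_cons_of_mem _ hq, hqd⟩
      · rintro ⟨q, hq, hqd⟩
        rcases List.mem_cons.1 hq with rfl | hq'
        · rw [hx] at hqd; cases hqd
        · exact ⟨q, hq', hqd⟩
    | some d' =>
      rw [pvStepA_some_snd _ x d' hx, PySem.Set.mem_add, ih]
      constructor
      · rintro (⟨q, hq, hqd⟩ | rfl)
        · exact ⟨q, List.mem_cons_of_mem _ hq, hqd⟩
        · exact ⟨x, List.mem_cons_self, hx⟩
      · rintro ⟨q, hq, hqd⟩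
        rcases List.mem_cons.1 hq with rfl | hq'
        · rw [hx] at hqd; cases hqd; right; rfl
        · left; exact ⟨q, hq', hqd⟩

-- get? of the pass-1 fold: the last matching item wins, else the initial dict answers
theorem pvLastDef_get (m : List (Int × List (String × String))) (d0 : PySem.Dict String Int)
    (key : String) :
    ((m.foldl (fun d p =>
        match pvDest p.2 with
        | some dst => d.insert dst p.1
        | none => d) d0).get? key) =
      ((m.reverse.find? (fun q => pvDest q.2 == some key)).map (·.1)).or (d0.get? key) := by
  induction m generalizing d0 with
  | nil => simp
  | cons x t ih =>
    simp only [List.foldl_cons, List.reverse_cons, List.find?_append, ih]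
    cases hf : t.reverse.find? (fun q => pvDest q.2 == some key) with
    | some q => simp
    | none =>
      cases hx : pvDest x.2 with
      | none => simp [hx]
      | some dst =>
        by_cases hk : key = dst
        · subst hk; simp [hx, PySem.Dict.get?_insert_self]
        · simp [hx, PySem.Dict.get?_insert, Ne.symm hk]
          exact fun h => absurd h hk

-- strictly increasing indices of enumerate
theorem pvEnum_pairwise (xs : List (List (String × String))) (s : Int) :
    (PySem.List.enumerate xs s).Pairwise (fun a b => a.1 < b.1) := by
  induction xs generalizing s with
  | nil => simp [PySem.List.enumerate]
  | cons x t ih =>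
    rw [PySem.List.enumerate_cons]
    refine List.Pairwise.cons ?_ (ih (s + 1))
    intro p hp
    rcases (PySem.List.mem_enumerate_iff t (s + 1) p).1 hp with ⟨k, hk, rfl⟩
    simp; omega

-- main equivalence of the two folds, under the per-suffix characterisation of LD
theorem pvMain (LD : PySem.Dict String Int) (l : List (Int × List (String × String)))
    (H : ∀ x t, x :: t <:+ l → ∀ d, pvDest x.2 = some d →
      ((∃ q ∈ t, pvDest q.2 = some d) ↔ ∃ j, LD.get? d = some j ∧ x.1 ≠ j)) :
    (l.foldr (fun x y => pvStepA y x) (PySem.Set.empty, PySem.Set.empty)).1 =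
      l.foldr (fun x y => pvStepB LD y x) PySem.Set.empty := by
  induction l with
  | nil => rfl
  | cons x t ih =>
    have iht : (t.foldr (fun x y => pvStepA y x) (PySem.Set.empty, PySem.Set.empty)).1 =
        t.foldr (fun x y => pvStepB LD y x) PySem.Set.empty :=
      ih (fun x' t' hsuf d hd => H x' t' (hsuf.trans (List.suffix_cons x t)) d hd)
    simp only [List.foldr_cons]
    cases hx : pvDest x.2 with
    | none => rw [pvStepA_none _ x hx, pvStepB_none LD _ x hx]; exact iht
    | some d =>
      rw [pvStepA_some_fst _ x d hx]
      have hiff := H x t (List.suffix_refl _) d hx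
      have hseen := pvSeenA_mem t d
      cases hLD : LD.get? d with
      | none =>
        rw [pvStepB_some_none LD _ x d hx hLD]
        have hno : ¬ ∃ q ∈ t, pvDest q.2 = some d := by
          rw [hiff]; rintro ⟨j, hj, -⟩; rw [hLD] at hj; cases hj
        have hm : d ∉ (t.foldr (fun x y => pvStepA y x)
            (PySem.Set.empty, PySem.Set.empty)).2 := fun h => hno (hseen.1 h)
        rw [if_neg hm]; exact iht
      | some j =>
        rw [pvStepB_some_some LD _ x d j hx hLD]
        by_cases hne : x.1 = j
        · have hno : ¬ ∃ q ∈ t, pvDest q.2 = some d := by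
            rw [hiff]; rintro ⟨j', hj', hne'⟩
            rw [hLD] at hj'; cases hj'; exact hne' hne
          have hm : d ∉ (t.foldr (fun x y => pvStepA y x)
              (PySem.Set.empty, PySem.Set.empty)).2 := fun h => hno (hseen.1 h)
          rw [if_neg hm, if_neg (not_not_intro hne)]; exact iht
        · have hyes : ∃ q ∈ t, pvDest q.2 = some d := hiff.2 ⟨j, hLD, hne⟩
          have hm : d ∈ (t.foldr (fun x y => pvStepA y x)
              (PySem.Set.empty, PySem.Set.empty)).2 := hseen.2 hyes
          rw [if_pos hm, if_pos hne, iht]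

-- the per-suffix hypothesis holds for l = enumerate(block_instrs) and LD = pvLastDef
theorem pvH (block_instrs : List (List (String × String))) :
    ∀ x t, x :: t <:+ PySem.List.enumerate block_instrs 0 → ∀ d, pvDest x.2 = some d →
      ((∃ q ∈ t, pvDest q.2 = some d) ↔
        ∃ j, (pvLastDef block_instrs).get? d = some j ∧ x.1 ≠ j) := by
  intro x t hsuf d hd
  rcases hsuf with ⟨pre, hpre⟩
  have hget : (pvLastDef block_instrs).get? d =
      (((PySem.List.enumerate block_instrs 0).reverse.find?
          (fun q => pvDest q.2 == some d)).map (·.1)).or (PySem.Dict.empty.get? d) :=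
    pvLastDef_get _ _ _
  rw [← hpre] at hget
  have hpw : (x :: t).Pairwise (fun a b : Int × List (String × String) => a.1 < b.1) := by
    have hall := pvEnum_pairwise block_instrs 0
    rw [← hpre] at hall
    exact hall.sublist (List.sublist_append_right pre (x :: t))
  simp only [List.reverse_append, List.reverse_cons, List.append_assoc,
    List.find?_append, PySem.Dict.get?_empty, Option.or_none] at hget
  rw [show List.find? (fun q => pvDest q.2 == some d) [x] = some x by simp [hd],
      Option.some_or] at hget
  constructor
  · rintro ⟨q, hq, hqd⟩
    cases hfind : t.reverse.find? (fun q => pvDest q.2 == some d) with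
    | none =>
      rw [List.find?_eq_none] at hfind
      exact absurd (by simp [hqd] : (pvDest q.2 == some d) = true)
        (hfind q (List.mem_reverse.mpr hq))
    | some q0 =>
      have hq0mem : q0 ∈ t := List.mem_reverse.mp (List.mem_of_find?_eq_some hfind)
      rw [hfind] at hget
      refine ⟨q0.1, by simpa using hget, ?_⟩
      have : x.1 < q0.1 := (List.pairwise_cons.1 hpw).1 q0 hq0mem
      omega
  · rintro ⟨j, hj, hne⟩
    by_contra hno
    have hnone : t.reverse.find? (fun q => pvDest q.2 == some d) = none := by
      rw [List.find?_eq_none]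
      intro q hq
      simp only [beq_iff_eq]
      exact fun hc => hno ⟨q, List.mem_reverse.mp hq, hc⟩
    rw [hnone] at hget
    simp only [Option.none_or, Option.map_some] at hget
    rw [hj] at hget
    exact hne (by simpa using hget.symm)

-- ===== VERDICT (by name: the statement is the Claim_ definition above) =====
theorem find_overwritten_instr_idxs_spec : Claim_equal_find_overwritten_instr_idxs := by
  intro block_instrs _
  unfold Spec_find_overwritten_instr_idxs find_overwritten_instr_idxs find_overwritten_instr_idxs_alt
  rw [List.foldl_reverse, List.foldl_reverse]
  exact pvMain (pvLastDef block_instrs) _ (pvH block_instrs)
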